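-- pv_equiv track=rewrite | github.com/kurt-gilby/advent_of_code | helper.py | get_index_of_pair_of_elements
-- ===== SOURCE A (Python) =====
-- def get_index_of_pair_of_elements(
--     list_of_elements: list[str], index_string: str
-- ) -> list[str]:
--     """
--     Takes list of pair elements and the string to check indexs
--     Gets the list of all indexs for all the pairs.
--     Returns list of indexs.
--     """
--     list_of_indexs = []
--     for element in list_of_elements:
--         for i in range(len(index_string) - 1):
--             check_element = index_string[i] + index_string[i + 1]
--             if element == check_element:
--                 list_of_indexs.append(str(i))
--                 list_of_indexs.append(str(i + 1))
--     if len(list_of_indexs) == 0: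
--         return None
--     return list_of_indexs
-- ===== SOURCE B (Python) =====
-- def get_index_of_pair_of_elements(
--     list_of_elements: list[str], index_string: str
-- ) -> list[str]:
--     # Index every adjacent char pair of index_string once, then answer each
--     # element by a dict lookup instead of rescanning the string.
--     pair_positions = {}
--     for i in range(len(index_string) - 1):
--         pair_positions.setdefault(index_string[i] + index_string[i + 1], []).append(i)
--     list_of_indexs = []
--     for element in list_of_elements:
--         for i in pair_positions.get(element, []):
--             list_of_indexs.append(str(i))
--             list_of_indexs.append(str(i + 1))
--     return list_of_indexs if list_of_indexs else None
-- ===== Notes on version B (the rewrite author's own statement) =====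
-- stated objective: faster
-- what changed: B builds a dict mapping each adjacent char pair of index_string to its position list in one pass over the string, then answers each element by a single dict lookup, instead of A's rescan of the whole string per element.
import Mathlib
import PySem

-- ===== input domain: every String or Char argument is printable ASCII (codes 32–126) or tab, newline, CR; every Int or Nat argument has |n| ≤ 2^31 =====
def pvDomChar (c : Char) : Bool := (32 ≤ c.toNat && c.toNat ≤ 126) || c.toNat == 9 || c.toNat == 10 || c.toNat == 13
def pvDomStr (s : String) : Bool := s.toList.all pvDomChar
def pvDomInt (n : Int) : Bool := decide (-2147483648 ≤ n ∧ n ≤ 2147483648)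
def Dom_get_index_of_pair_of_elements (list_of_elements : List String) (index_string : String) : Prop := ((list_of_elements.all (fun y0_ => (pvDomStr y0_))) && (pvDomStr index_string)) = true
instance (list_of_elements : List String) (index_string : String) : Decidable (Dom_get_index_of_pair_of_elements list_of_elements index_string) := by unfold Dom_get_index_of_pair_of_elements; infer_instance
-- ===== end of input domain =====

-- B replaces A's per-element rescan of the whole string by a dict of pair → positions built once.

-- ===== PORT A =====
-- index_string[i] + index_string[i+1]; i always in range (i < len-1), so getD never hits the default
def pvPairAt (cs : List Char) (i : Nat) : String := String.ofList [cs.getD i ' ', cs.getD (i + 1) ' ']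

-- range(len(index_string) - 1): List.range (n - 1) is exact (Python range with negative stop is empty, Nat sub floors at 0)
def get_index_of_pair_of_elements (list_of_elements : List String) (index_string : String) : Option (List String) :=
  let cs := index_string.toList
  let list_of_indexs := list_of_elements.foldl (fun acc element =>
    (List.range (cs.length - 1)).foldl (fun acc2 i =>
      if element = pvPairAt cs i then
        acc2 ++ [PySem.Int.toStr (Int.ofNat i), PySem.Int.toStr (Int.ofNat i + 1)]
      else acc2) acc) []
  if list_of_indexs.length = 0 then none else some list_of_indexs

-- ===== PORT B =====
-- pair_positions.setdefault(pair, []).append(i)  =  d.modify pair [] (· ++ [i])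
def get_index_of_pair_of_elements_alt (list_of_elements : List String) (index_string : String) : Option (List String) :=
  let cs := index_string.toList
  let pair_positions := (List.range (cs.length - 1)).foldl
    (fun (d : PySem.Dict String (List Nat)) i => d.modify (pvPairAt cs i) [] (· ++ [i]))
    PySem.Dict.empty
  let list_of_indexs := list_of_elements.foldl (fun acc element =>
    (pair_positions.getD element []).foldl (fun acc2 i =>
      acc2 ++ [PySem.Int.toStr (Int.ofNat i), PySem.Int.toStr (Int.ofNat i + 1)]) acc) []
  if list_of_indexs.isEmpty then none else some list_of_indexs

-- ===== PRECONDITION & SPEC =====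
def Spec_get_index_of_pair_of_elements (list_of_elements : List String) (index_string : String) (out : Option (List String)) : Prop := out = get_index_of_pair_of_elements_alt list_of_elements index_string
instance (list_of_elements : List String) (index_string : String) (out : Option (List String)) : Decidable (Spec_get_index_of_pair_of_elements list_of_elements index_string out) := by unfold Spec_get_index_of_pair_of_elements; infer_instance

-- ===== CLAIM (what is proved, stated in full; the proofs are below) =====
def Claim_equal_get_index_of_pair_of_elements : Prop := ∀ (list_of_elements : List String) (index_string : String), Dom_get_index_of_pair_of_elements list_of_elements index_string → Spec_get_index_of_pair_of_elements list_of_elements index_string (get_index_of_pair_of_elements list_of_elements index_string)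

-- ===== LEMMAS AND PROOFS =====

-- A's inner loop: conditional two-element append = flatMap over the matching indices
theorem pv_foldl_if_append {α β : Type} (p : α → Prop) [DecidablePred p] (g : α → List β)
    (l : List α) (acc : List β) :
    l.foldl (fun a x => if p x then a ++ g x else a) acc
      = acc ++ (l.filter (fun x => decide (p x))).flatMap g := by
  induction l generalizing acc with
  | nil => simp
  | cons x xs ih =>
    simp only [List.foldl_cons, List.filter_cons]
    by_cases h : p x <;> simp [h, ih]

-- A's whole accumulation in closed form
theorem pv_A_flat (cs : List Char) (es : List String) (acc : List String) :
    es.foldl (fun acc e => (List.range (cs.length - 1)).foldl (fun a i =>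
        if e = pvPairAt cs i then a ++ [PySem.Int.toStr (Int.ofNat i), PySem.Int.toStr (Int.ofNat i + 1)]
        else a) acc) acc
      = acc ++ es.flatMap (fun e =>
          ((List.range (cs.length - 1)).filter (fun i => decide (e = pvPairAt cs i))).flatMap
            (fun i => [PySem.Int.toStr (Int.ofNat i), PySem.Int.toStr (Int.ofNat i + 1)])) := by
  induction es generalizing acc with
  | nil => simp
  | cons e es ih =>
    simp only [List.foldl_cons, List.flatMap_cons]
    rw [pv_foldl_if_append (fun i => e = pvPairAt cs i), ih, List.append_assoc]

-- B's output loop in closed form, for any lookup table m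
theorem pv_B_flat (m : String → List Nat) (es : List String) (acc : List String) :
    es.foldl (fun acc e => (m e).foldl (fun a i =>
        a ++ [PySem.Int.toStr (Int.ofNat i), PySem.Int.toStr (Int.ofNat i + 1)]) acc) acc
      = acc ++ es.flatMap (fun e =>
          (m e).flatMap (fun i => [PySem.Int.toStr (Int.ofNat i), PySem.Int.toStr (Int.ofNat i + 1)])) := by
  induction es generalizing acc with
  | nil => simp
  | cons e es ih =>
    simp only [List.foldl_cons, List.flatMap_cons]
    rw [PySem.List.foldl_append_eq_flatMap, ih, List.append_assoc]

-- the dict built by setdefault-append: lookup e gives exactly the matching indices, in order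
theorem pv_dict_lookup (cs : List Char) (l : List Nat) (d : PySem.Dict String (List Nat)) (e : String) :
    ((l.foldl (fun d i => d.modify (pvPairAt cs i) [] (· ++ [i])) d).getD e [])
      = d.getD e [] ++ l.filter (fun i => decide (pvPairAt cs i = e)) := by
  induction l generalizing d with
  | nil => simp
  | cons x xs ih =>
    simp only [List.foldl_cons, List.filter_cons, ih, PySem.Dict.getD_modify]
    by_cases h : pvPairAt cs x = e
    · simp [h]
    · have h' : ¬ e = pvPairAt cs x := fun he => h he.symm
      simp [h, h']

-- ===== VERDICT (by name: the statement is the Claim_ definition above) =====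
theorem get_index_of_pair_of_elements_spec : Claim_equal_get_index_of_pair_of_elements := by
  intro es s _
  show _ = _
  unfold get_index_of_pair_of_elements get_index_of_pair_of_elements_alt
  simp only [pv_A_flat, pv_B_flat, pv_dict_lookup, PySem.Dict.getD_empty, List.nil_append]
  have hfil : ∀ e : String,
      (List.range (s.toList.length - 1)).filter (fun i => decide (e = pvPairAt s.toList i))
        = (List.range (s.toList.length - 1)).filter (fun i => decide (pvPairAt s.toList i = e)) := by
    intro e
    apply List.filter_congr
    intro i _
    simp [eq_comm]
  simp only [hfil, List.isEmpty_iff, List.length_eq_zero_iff]
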